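-- pv_equiv track=rewrite | github.com/ShreyanGoswami/learning-ds | Sliding_Window_18_Nov_2023/frog.py | longest_distance
-- ===== SOURCE A (Python) =====
-- def longest_distance(blocks):
--     n = len(blocks)
--     left = {i: i for i in range(n)}
--     right = {i: i for i in range(n)}
--     for i in range(1, n):
--         if blocks[i] >= blocks[i - 1]:
--             left[i] = left[i - 1]
--     for i in range(n - 2, -1, -1):
--         if blocks[i] >= blocks[i + 1]:
--             right[i] = right[i + 1]
--     max_distance = 0
--     for i in range(n):
--         max_distance = max(max_distance, right[i] - left[i] + 1)
--     return max_distance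
-- ===== SOURCE B (Python) =====
-- def longest_distance(blocks):
--     n = len(blocks)
--     if n == 0:
--         return 0
--     best = 1
--     start = 0          # left end of the current unimodal (up-then-down) window
--     level_start = 0    # index where the current run of equal values began
--     going_down = False # last strict comparison seen was a decrease
--     for i in range(1, n):
--         if blocks[i] > blocks[i - 1]:
--             if going_down:
--                 start = level_start  # valley: restart at bottom plateau
--             going_down = False
--         elif blocks[i] < blocks[i - 1]:
--             going_down = True
--         if blocks[i] != blocks[i - 1]:
--             level_start = i
--         best = max(best, i - start + 1)
--     return best
-- ===== Notes on version B (the rewrite author's own statement) =====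
-- stated objective: faster
-- what changed: A makes three passes building two dicts of run boundaries (start of the non-decreasing run ending at i, end of the non-increasing run starting at i) and maximizes their differences; B is a single left-to-right sliding-window scan that maintains the start of the current up-then-down window, a last-strict-direction flag and the start of the current plateau, resetting the window to the bottom plateau whenever a valley is seen. (single pass, no dict allocations: measured ~1.7x faster at the largest timing size)
import Mathlib
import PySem

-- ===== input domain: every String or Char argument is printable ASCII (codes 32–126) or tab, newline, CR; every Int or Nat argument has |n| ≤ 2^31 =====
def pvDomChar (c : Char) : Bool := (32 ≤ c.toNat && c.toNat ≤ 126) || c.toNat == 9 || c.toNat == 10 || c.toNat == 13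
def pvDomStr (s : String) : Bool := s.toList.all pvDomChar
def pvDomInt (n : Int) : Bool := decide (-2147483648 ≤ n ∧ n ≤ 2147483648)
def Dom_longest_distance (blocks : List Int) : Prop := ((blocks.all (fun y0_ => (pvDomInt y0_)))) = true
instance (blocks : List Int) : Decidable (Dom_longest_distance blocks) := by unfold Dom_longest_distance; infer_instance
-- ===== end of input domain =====

-- B replaces A's three passes over two boundary-index dicts by a single left-to-right
-- sliding-window scan (window start, direction flag, plateau start); objective: alternative.

-- ===== PORT A =====
def longest_distance (blocks : List Int) : Int :=
  let n : Int := PySem.List.len blocks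
  let left0 : PySem.Dict Int Int :=
    (PySem.List.pyRange 0 n 1).foldl (fun d i => d.insert i i) PySem.Dict.empty
  let right0 : PySem.Dict Int Int :=
    (PySem.List.pyRange 0 n 1).foldl (fun d i => d.insert i i) PySem.Dict.empty
  let left :=
    (PySem.List.pyRange 1 n 1).foldl (fun d i =>
      if PySem.List.pyGetD blocks (i - 1) 0 ≤ PySem.List.pyGetD blocks i 0 then
        d.insert i (d.getD (i - 1) 0)
      else d) left0
  let right :=
    (PySem.List.pyRange (n - 2) (-1) (-1)).foldl (fun d i =>
      if PySem.List.pyGetD blocks (i + 1) 0 ≤ PySem.List.pyGetD blocks i 0 then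
        d.insert i (d.getD (i + 1) 0)
      else d) right0
  (PySem.List.pyRange 0 n 1).foldl (fun m i => max m (right.getD i 0 - left.getD i 0 + 1)) 0

-- ===== PORT B =====
-- state tuple: (best, start, level_start, going_down)
def longest_distance_alt (blocks : List Int) : Int :=
  let n : Int := PySem.List.len blocks
  if n = 0 then 0
  else
    let s :=
      (PySem.List.pyRange 1 n 1).foldl (fun (s : Int × Int × Int × Bool) i =>
        let start : Int :=
          if PySem.List.pyGetD blocks (i - 1) 0 < PySem.List.pyGetD blocks i 0 ∧ s.2.2.2 then
            s.2.2.1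
          else s.2.1
        let goingDown : Bool :=
          if PySem.List.pyGetD blocks (i - 1) 0 < PySem.List.pyGetD blocks i 0 then false
          else if PySem.List.pyGetD blocks i 0 < PySem.List.pyGetD blocks (i - 1) 0 then true
          else s.2.2.2
        let levelStart : Int :=
          if PySem.List.pyGetD blocks i 0 ≠ PySem.List.pyGetD blocks (i - 1) 0 then i
          else s.2.2.1
        (max s.1 (i - start + 1), start, levelStart, goingDown))
      (1, 0, 0, false)
    s.1

-- ===== PRECONDITION & SPEC =====
def Spec_longest_distance (blocks : List Int) (out : Int) : Prop := out = longest_distance_alt blocks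
instance (blocks : List Int) (out : Int) : Decidable (Spec_longest_distance blocks out) := by unfold Spec_longest_distance; infer_instance

-- ===== CLAIM (what is proved, stated in full; the proofs are below) =====
def Claim_equal_longest_distance : Prop := ∀ (blocks : List Int), Dom_longest_distance blocks → Spec_longest_distance blocks (longest_distance blocks)

-- ===== LEMMAS AND PROOFS =====

-- start of the maximal non-decreasing run ending at i
def Lf (bs : List Int) : Nat → Nat
  | 0 => 0
  | (i+1) => if bs.getD i 0 ≤ bs.getD (i+1) 0 then Lf bs i else i + 1

-- end of the maximal non-increasing run starting at i
def Rf (bs : List Int) (i : Nat) : Nat :=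
  if _h : i + 1 < bs.length ∧ bs.getD (i+1) 0 ≤ bs.getD i 0 then Rf bs (i+1) else i
termination_by bs.length - i

def fv (bs : List Int) (i : Nat) : Int := (Rf bs i : Int) - (Lf bs i : Int) + 1

-- start of the maximal non-increasing run ending at i
def Gf (bs : List Int) : Nat → Nat
  | 0 => 0
  | (i+1) => if bs.getD (i+1) 0 ≤ bs.getD i 0 then Gf bs i else i + 1

-- start of the plateau of equal values ending at i
def lvlF (bs : List Int) : Nat → Nat
  | 0 => 0
  | (i+1) => if bs.getD (i+1) 0 = bs.getD i 0 then lvlF bs i else i + 1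

-- whether the last strict comparison up to i was a decrease
def dirF (bs : List Int) : Nat → Bool
  | 0 => false
  | (i+1) => if bs.getD i 0 < bs.getD (i+1) 0 then false
             else if bs.getD (i+1) 0 < bs.getD i 0 then true
             else dirF bs i

-- the window start maintained by B
def Sf (bs : List Int) : Nat → Nat
  | 0 => 0
  | (i+1) => if bs.getD i 0 < bs.getD (i+1) 0 ∧ dirF bs i then lvlF bs i else Sf bs i

def wv (bs : List Int) (i : Nat) : Int := (i : Int) - (Sf bs i : Int) + 1

theorem Lf_le (bs : List Int) (i : Nat) : Lf bs i ≤ i := by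
  induction i with
  | zero => simp [Lf]
  | succ i ih => rw [Lf]; split <;> omega

theorem Lf_mono (bs : List Int) {p q : Nat} (h : p ≤ q) : Lf bs p ≤ Lf bs q := by
  induction q with
  | zero => have hp : p = 0 := by omega
            subst hp; exact le_rfl
  | succ q ih =>
    rcases Nat.lt_or_ge p (q+1) with h1 | h1
    · have := ih (by omega)
      have := Lf_le bs p
      rw [Lf]; split <;> omega
    · have : p = q + 1 := by omega
      subst this; exact le_rfl

theorem le_Rf (bs : List Int) (i : Nat) : i ≤ Rf bs i := by
  rw [Rf]; split
  · have := le_Rf bs (i+1); omega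
  · exact le_rfl
termination_by bs.length - i
decreasing_by omega

theorem Rf_lt (bs : List Int) (i : Nat) (h : i < bs.length) : Rf bs i < bs.length := by
  rw [Rf]; split
  · exact Rf_lt bs (i+1) (by omega)
  · exact h
termination_by bs.length - i
decreasing_by omega

theorem Rf_stop (bs : List Int) (i : Nat) :
    ¬ (Rf bs i + 1 < bs.length ∧ bs.getD (Rf bs i + 1) 0 ≤ bs.getD (Rf bs i) 0) := by
  rw [Rf]; split
  · exact Rf_stop bs (i+1)
  · assumption
termination_by bs.length - i
decreasing_by omega

theorem one_le_fv (bs : List Int) (i : Nat) : 1 ≤ fv bs i := by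
  have h1 := Lf_le bs i; have h2 := le_Rf bs i; unfold fv; omega

theorem Gf_le (bs : List Int) (i : Nat) : Gf bs i ≤ i := by
  induction i with
  | zero => simp [Gf]
  | succ i ih => rw [Gf]; split <;> omega

theorem Gf_Rf (bs : List Int) (i : Nat) : Gf bs (Rf bs i) = Gf bs i := by
  rw [Rf]; split
  · rename_i h
    rw [Gf_Rf bs (i+1), Gf, if_pos h.2]
  · rfl
termination_by bs.length - i
decreasing_by omega

theorem le_Rf_Gf (bs : List Int) (i : Nat) (hi : i < bs.length) : i ≤ Rf bs (Gf bs i) := by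
  induction i with
  | zero => exact le_Rf bs _
  | succ i ih =>
    rw [Gf]; split
    · rename_i h
      have h1 := ih (by omega)
      have h2 := Rf_stop bs (Gf bs i)
      rcases Nat.lt_or_ge i (Rf bs (Gf bs i)) with h3 | h3
      · omega
      · have : Rf bs (Gf bs i) = i := by omega
        rw [this] at h2
        exact absurd ⟨hi, h⟩ h2
    · exact le_Rf bs _

-- joint invariant of B's scan state
theorem state_inv (bs : List Int) (i : Nat) :
    (dirF bs i = true → lvlF bs i = Lf bs i)
    ∧ (dirF bs i = false → Lf bs (Gf bs i) = Lf bs i)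
    ∧ Sf bs i = Lf bs (Gf bs i) := by
  induction i with
  | zero => exact ⟨fun h => by simp [dirF] at h, fun _ => rfl, rfl⟩
  | succ i ih =>
    obtain ⟨h2, h3, h1⟩ := ih
    rcases lt_trichotomy (bs.getD i 0) (bs.getD (i+1) 0) with hc | hc | hc
    · -- strict increase
      have hle : bs.getD i 0 ≤ bs.getD (i+1) 0 := le_of_lt hc
      have hG : Gf bs (i+1) = i + 1 := by rw [Gf, if_neg (by omega)]
      have hL : Lf bs (i+1) = Lf bs i := by rw [Lf, if_pos hle]
      refine ⟨?_, ?_, ?_⟩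
      · intro hd; rw [dirF, if_pos hc] at hd; exact absurd hd (by simp)
      · intro _; rw [hG, hL]
      · rw [Sf, hG, hL]
        by_cases hd : dirF bs i
        · rw [if_pos ⟨hc, hd⟩, h2 hd]
        · rw [if_neg (by simp [hd]), h1, h3 (by simpa using hd)]
    · -- equal
      have hG : Gf bs (i+1) = Gf bs i := by rw [Gf, if_pos (by omega)]
      have hL : Lf bs (i+1) = Lf bs i := by rw [Lf, if_pos (by omega)]
      have hd : dirF bs (i+1) = dirF bs i := by rw [dirF, if_neg (by omega), if_neg (by omega)]
      have hlv : lvlF bs (i+1) = lvlF bs i := by rw [lvlF, if_pos hc.symm]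
      refine ⟨?_, ?_, ?_⟩
      · intro h; rw [hlv, hL]; exact h2 (hd ▸ h)
      · intro h; rw [hG, hL]; exact h3 (hd ▸ h)
      · rw [Sf, if_neg (by omega), h1, hG]
    · -- strict decrease
      have hG : Gf bs (i+1) = Gf bs i := by rw [Gf, if_pos (by omega)]
      have hL : Lf bs (i+1) = i + 1 := by rw [Lf, if_neg (by omega)]
      refine ⟨?_, ?_, ?_⟩
      · intro _; rw [lvlF, if_neg (by omega), hL]
      · intro h; rw [dirF, if_neg (by omega), if_pos hc] at h; exact absurd h (by simp)
      · rw [Sf, if_neg (by omega), h1, hG]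

theorem Sf_eq (bs : List Int) (i : Nat) : Sf bs i = Lf bs (Gf bs i) := (state_inv bs i).2.2

-- ===== A-side characterization (as in the dict/three-pass structure) =====

theorem Rf_last (bs : List Int) (i : Nat) (h : i + 1 = bs.length) : Rf bs i = i := by
  rw [Rf]; split <;> omega

theorem d0_getD (n : Nat) (i : Nat) :
    (((PySem.List.pyRange 0 (n:Int) 1).foldl (fun d i => d.insert i i) PySem.Dict.empty).getD (i:Int) 0)
      = if i < n then (i:Int) else 0 := by
  induction n with
  | zero => simp [PySem.List.pyRange_one_eq_nil, PySem.Dict.getD_empty]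
  | succ n ih =>
    have : ((n+1 : Nat) : Int) = (n : Int) + 1 := by push_cast; ring
    rw [this, PySem.List.pyRange_one_succ_right (by positivity), List.foldl_append]
    simp only [List.foldl]
    rw [PySem.Dict.getD_insert]
    split
    · rename_i h; have : i = n := by exact_mod_cast h
      subst this; simp
    · rename_i h; have hne : i ≠ n := by intro he; exact h (by exact_mod_cast he)
      rw [ih]; split <;> split <;> first | rfl | omega

theorem left_char (bs : List Int) (k : Nat) (hk : k ≤ bs.length) :
    ∀ i : Nat, i < bs.length →
    (((PySem.List.pyRange 1 (k:Int) 1).foldl (fun d i =>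
        if PySem.List.pyGetD bs (i - 1) 0 ≤ PySem.List.pyGetD bs i 0 then
          d.insert i (d.getD (i - 1) 0)
        else d)
      ((PySem.List.pyRange 0 ((bs.length : Nat):Int) 1).foldl (fun d i => d.insert i i) PySem.Dict.empty)).getD (i:Int) 0)
      = if i < k then (Lf bs i : Int) else (i:Int) := by
  induction k with
  | zero => intro i hi; simp [PySem.List.pyRange_one_eq_nil, d0_getD, hi]
  | succ k ih =>
    intro i hi
    by_cases hk0 : k = 0
    · subst hk0
      rw [show ((0+1 : Nat) : Int) = 1 by norm_num, PySem.List.pyRange_one_eq_nil le_rfl]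
      simp only [List.foldl_nil]
      rw [d0_getD]
      rcases Nat.eq_zero_or_pos i with h | h
      · subst h; simp [hi, Lf]
      · simp [hi]; omega
    · have hk1 : 1 ≤ (k:Int) := by omega
      have hcast1 : ((k+1 : Nat) : Int) = (k : Int) + 1 := by push_cast; ring
      rw [hcast1, PySem.List.pyRange_one_succ_right hk1, List.foldl_append]
      simp only [List.foldl]
      have hkm : k - 1 + 1 = k := by omega
      have hcast : (k:Int) - 1 = ((k-1 : Nat) : Int) := by omega
      have hLs : Lf bs ((k-1)+1) = if bs.getD (k-1) 0 ≤ bs.getD ((k-1)+1) 0 then Lf bs (k-1) else (k-1)+1 := by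
        rw [Lf]
      rw [hkm] at hLs
      split
      · rename_i hge
        rw [hcast] at hge; simp only [PySem.List.pyGetD_natCast] at hge
        rw [PySem.Dict.getD_insert]
        split
        · rename_i h; have hik : i = k := by exact_mod_cast h
          subst hik
          rw [hcast, ih (by omega) (i-1) (by omega), if_pos (by omega), if_pos (by omega)]
          rw [hLs, if_pos hge]
        · rename_i h; have hne : i ≠ k := fun he => h (by exact_mod_cast he)
          rw [ih (by omega) i hi]; split <;> split <;> first | rfl | omega
      · rename_i hge
        rw [hcast] at hge; simp only [PySem.List.pyGetD_natCast] at hge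
        rw [ih (by omega) i hi]
        by_cases hik : i = k
        · subst hik
          rw [if_neg (by omega), if_pos (by omega), hLs, if_neg hge]
        · split <;> split <;> first | rfl | omega

theorem right_char (bs : List Int) (m : Nat) (hm : m + 1 ≤ bs.length)
    (d : PySem.Dict Int Int)
    (hd : ∀ i : Nat, i < bs.length → d.getD (i:Int) 0 = if m ≤ i then (Rf bs i : Int) else (i:Int)) :
    ∀ i : Nat, i < bs.length →
    (((PySem.List.pyRange ((m:Int) - 1) (-1) (-1)).foldl (fun d i =>
        if PySem.List.pyGetD bs (i + 1) 0 ≤ PySem.List.pyGetD bs i 0 then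
          d.insert i (d.getD (i + 1) 0)
        else d) d).getD (i:Int) 0) = (Rf bs i : Int) := by
  induction m generalizing d with
  | zero =>
    intro i hi
    rw [show ((0:Nat):Int) - 1 = -1 by norm_num, PySem.List.pyRange_neg_one_eq_nil le_rfl]
    simpa using hd i hi
  | succ m ih =>
    intro i hi
    have hms : ((m+1 : Nat) : Int) - 1 = (m : Int) := by push_cast; ring
    rw [hms, PySem.List.pyRange_neg_one_cons (by omega), List.foldl_cons]
    have hcast : (m:Int) + 1 = ((m+1 : Nat) : Int) := by push_cast; ring
    have hRs : Rf bs m = if m + 1 < bs.length ∧ bs.getD (m+1) 0 ≤ bs.getD m 0 then Rf bs (m+1) else m := by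
      rw [Rf]; split <;> rename_i h <;> first | rw [if_pos h] | rw [if_neg h] | rfl
    refine ih (by omega) _ ?_ i hi
    intro j hj
    split
    · rename_i hge
      rw [hcast] at hge; simp only [PySem.List.pyGetD_natCast] at hge
      rw [PySem.Dict.getD_insert]
      split
      · rename_i h; have hjm : j = m := by exact_mod_cast h
        subst hjm
        rw [hcast, hd (j+1) (by omega), if_pos (by omega), if_pos (by omega)]
        rw [hRs, if_pos ⟨by omega, hge⟩]
      · rename_i h; have hne : j ≠ m := fun he => h (by exact_mod_cast he)
        rw [hd j hj]; split <;> split <;> first | rfl | omega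
    · rename_i hge
      rw [hcast] at hge; simp only [PySem.List.pyGetD_natCast] at hge
      rw [hd j hj]
      by_cases hjm : j = m
      · subst hjm
        rw [if_neg (by omega), if_pos (by omega), hRs, if_neg (by intro hc; exact hge hc.2)]
      · split <;> split <;> first | rfl | omega

theorem a_char (blocks : List Int) (hn : 1 ≤ blocks.length) :
    longest_distance blocks
      = List.foldl max 0 ((PySem.List.pyRange 0 ((blocks.length : Nat):Int) 1).map (fun x => fv blocks x.toNat)) := by
  have hd0 : ∀ i : Nat, i < blocks.length →
      (((PySem.List.pyRange 0 ((blocks.length : Nat):Int) 1).foldl (fun d i => d.insert i i) PySem.Dict.empty).getD (i:Int) 0)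
        = if blocks.length - 1 ≤ i then ((Rf blocks i : Nat) : Int) else (i:Int) := by
    intro i hi
    rw [d0_getD, if_pos hi]
    by_cases hil : blocks.length - 1 ≤ i
    · rw [if_pos hil, Rf_last blocks i (by omega)]
    · rw [if_neg hil]
  simp only [longest_distance, PySem.List.len_eq]
  rw [show ((blocks.length : Nat) : Int) - 2 = (((blocks.length - 1 : Nat) : Int)) - 1 by omega]
  rw [← List.foldl_map]
  congr 1
  apply List.map_congr_left
  intro x hx
  rw [PySem.List.mem_pyRange_one] at hx
  have hxl : x.toNat < blocks.length := by omega
  have hxe : x = ((x.toNat : Nat) : Int) := by omega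
  rw [hxe]
  simp only [Int.toNat_natCast]
  rw [right_char blocks (blocks.length - 1) (by omega) _ hd0 x.toNat hxl,
      left_char blocks blocks.length le_rfl x.toNat hxl, if_pos hxl]
  simp only [fv]

-- ===== B-side characterization (the single scan) =====

theorem b_loop (bs : List Int) (k : Nat) (hk : 1 ≤ k) :
    ((PySem.List.pyRange 1 (k:Int) 1).foldl (fun (s : Int × Int × Int × Bool) i =>
        let start : Int :=
          if PySem.List.pyGetD bs (i - 1) 0 < PySem.List.pyGetD bs i 0 ∧ s.2.2.2 then
            s.2.2.1
          else s.2.1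
        let goingDown : Bool :=
          if PySem.List.pyGetD bs (i - 1) 0 < PySem.List.pyGetD bs i 0 then false
          else if PySem.List.pyGetD bs i 0 < PySem.List.pyGetD bs (i - 1) 0 then true
          else s.2.2.2
        let levelStart : Int :=
          if PySem.List.pyGetD bs i 0 ≠ PySem.List.pyGetD bs (i - 1) 0 then i
          else s.2.2.1
        (max s.1 (i - start + 1), start, levelStart, goingDown))
      (1, 0, 0, false))
    = (List.foldl max 1 ((PySem.List.pyRange 1 (k:Int) 1).map (fun x => wv bs x.toNat)),
       ((Sf bs (k-1) : Nat) : Int), ((lvlF bs (k-1) : Nat) : Int), dirF bs (k-1)) := by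
  induction k with
  | zero => omega
  | succ k ih =>
    by_cases hk0 : k = 0
    · subst hk0
      rw [show ((0+1 : Nat) : Int) = 1 by norm_num, PySem.List.pyRange_one_eq_nil le_rfl]
      simp [Sf, lvlF, dirF]
    · have hk1 : 1 ≤ (k:Int) := by omega
      have hcast1 : ((k+1 : Nat) : Int) = (k : Int) + 1 := by push_cast; ring
      rw [hcast1, PySem.List.pyRange_one_succ_right hk1, List.foldl_append, List.map_append,
          List.foldl_append, ih (by omega)]
      simp only [List.foldl_cons, List.foldl_nil, List.map_cons, List.map_nil]
      have hkm : k - 1 + 1 = k := by omega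
      have hcast : (k:Int) - 1 = ((k-1 : Nat) : Int) := by omega
      have hSs : Sf bs ((k-1)+1)
          = if bs.getD (k-1) 0 < bs.getD ((k-1)+1) 0 ∧ dirF bs (k-1) then lvlF bs (k-1) else Sf bs (k-1) := by
        rw [Sf]
      have hds : dirF bs ((k-1)+1)
          = if bs.getD (k-1) 0 < bs.getD ((k-1)+1) 0 then false
            else if bs.getD ((k-1)+1) 0 < bs.getD (k-1) 0 then true else dirF bs (k-1) := by
        rw [dirF]
      have hls : lvlF bs ((k-1)+1)
          = if bs.getD ((k-1)+1) 0 = bs.getD (k-1) 0 then lvlF bs (k-1) else (k-1)+1 := by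
        rw [lvlF]
      rw [hkm] at hSs hds hls
      simp only [hcast, PySem.List.pyGetD_natCast, Nat.add_sub_cancel]
      refine Prod.ext ?_ (Prod.ext ?_ (Prod.ext ?_ ?_))
      · simp only [wv, Int.toNat_natCast]
        rw [hSs]
        split <;> rfl
      · rw [hSs]
        split <;> rfl
      · rcases eq_or_ne (bs.getD k 0) (bs.getD (k-1) 0) with h | h
        · rw [hls, if_pos h, if_neg (show ¬(bs.getD k 0 ≠ bs.getD (k-1) 0) from not_not_intro h)]
        · rw [hls, if_neg h, if_pos h]
      · rw [hds]

theorem b_char (blocks : List Int) (hn : 1 ≤ blocks.length) :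
    longest_distance_alt blocks
      = List.foldl max 1 ((PySem.List.pyRange 1 ((blocks.length : Nat):Int) 1).map (fun x => wv blocks x.toNat)) := by
  simp only [longest_distance_alt, PySem.List.len_eq]
  rw [if_neg (show ¬ ((blocks.length : Nat) : Int) = 0 by omega)]
  rw [b_loop blocks blocks.length hn]

-- ===== the two maxima agree =====

theorem max_eq (bs : List Int) (hn : 1 ≤ bs.length) :
    List.foldl max 0 ((PySem.List.pyRange 0 ((bs.length : Nat):Int) 1).map (fun x => fv bs x.toNat))
      = List.foldl max 1 ((PySem.List.pyRange 1 ((bs.length : Nat):Int) 1).map (fun x => wv bs x.toNat)) := by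
  set F : Int → Int := fun x => fv bs x.toNat with hF
  set W : Int → Int := fun x => wv bs x.toNat with hW
  set l1 := (PySem.List.pyRange 0 ((bs.length : Nat):Int) 1).map F with hl1
  set l2 := (PySem.List.pyRange 1 ((bs.length : Nat):Int) 1).map W with hl2
  have hw_le : ∀ i : Nat, i < bs.length → wv bs i ≤ fv bs (Gf bs i) := by
    intro i hi
    have h1 := le_Rf_Gf bs i hi
    simp only [wv, fv, Sf_eq]
    omega
  have hf_le : ∀ p : Nat, p < bs.length → fv bs p ≤ wv bs (Rf bs p) := by
    intro p hp
    have h1 : Sf bs (Rf bs p) = Lf bs (Gf bs p) := by rw [Sf_eq, Gf_Rf]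
    have h2 : Lf bs (Gf bs p) ≤ Lf bs p := Lf_mono bs (Gf_le bs p)
    simp only [wv, fv, h1]
    omega
  have hmem12 : ∀ y ∈ l1, y ≤ List.foldl max 1 l2 := by
    intro y hy
    rw [hl1] at hy
    obtain ⟨x, hx, rfl⟩ := List.mem_map.mp hy
    rw [PySem.List.mem_pyRange_one] at hx
    have hxl : x.toNat < bs.length := by omega
    have hfw := hf_le x.toNat hxl
    rcases Nat.eq_zero_or_pos (Rf bs x.toNat) with hr | hr
    · have : wv bs (Rf bs x.toNat) = 1 := by rw [hr]; simp [wv, Sf]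
      calc F x = fv bs x.toNat := rfl
        _ ≤ 1 := by rw [← this]; exact hfw
        _ ≤ _ := (PySem.List.le_foldl_max l2 1).1
    · have hrl := Rf_lt bs x.toNat hxl
      have hmem : W ((Rf bs x.toNat : Nat) : Int) ∈ l2 := by
        rw [hl2]
        exact List.mem_map.mpr ⟨_, PySem.List.mem_pyRange_one.mpr ⟨by omega, by omega⟩, rfl⟩
      have : W ((Rf bs x.toNat : Nat) : Int) = wv bs (Rf bs x.toNat) := by
        rw [hW]; simp
      calc F x = fv bs x.toNat := rfl
        _ ≤ wv bs (Rf bs x.toNat) := hfw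
        _ ≤ _ := by rw [← this]; exact (PySem.List.le_foldl_max l2 1).2 _ hmem
  have hf0 : F 0 ∈ l1 := by
    rw [hl1]
    exact List.mem_map.mpr ⟨0, PySem.List.mem_pyRange_one.mpr ⟨le_rfl, by omega⟩, rfl⟩
  have hmem21 : ∀ y ∈ l2, y ≤ List.foldl max 0 l1 := by
    intro y hy
    rw [hl2] at hy
    obtain ⟨x, hx, rfl⟩ := List.mem_map.mp hy
    rw [PySem.List.mem_pyRange_one] at hx
    have hxl : x.toNat < bs.length := by omega
    have hwf := hw_le x.toNat hxl
    have hg : Gf bs x.toNat < bs.length := lt_of_le_of_lt (Gf_le bs x.toNat) hxl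
    have hmem : F ((Gf bs x.toNat : Nat) : Int) ∈ l1 := by
      rw [hl1]
      exact List.mem_map.mpr ⟨_, PySem.List.mem_pyRange_one.mpr ⟨by omega, by omega⟩, rfl⟩
    have : F ((Gf bs x.toNat : Nat) : Int) = fv bs (Gf bs x.toNat) := by
      rw [hF]; simp
    calc W x = wv bs x.toNat := rfl
      _ ≤ fv bs (Gf bs x.toNat) := hwf
      _ ≤ _ := by rw [← this]; exact (PySem.List.le_foldl_max l1 0).2 _ hmem
  apply le_antisymm
  · rcases PySem.List.foldl_max_mem l1 0 with h | h
    · rw [h]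
      calc (0:Int) ≤ 1 := by norm_num
        _ ≤ _ := (PySem.List.le_foldl_max l2 1).1
    · exact hmem12 _ h
  · rcases PySem.List.foldl_max_mem l2 1 with h | h
    · rw [h]
      calc (1:Int) ≤ F 0 := by simpa using one_le_fv bs 0
        _ ≤ _ := (PySem.List.le_foldl_max l1 0).2 _ hf0
    · exact hmem21 _ h

theorem ab_eq (blocks : List Int) : longest_distance blocks = longest_distance_alt blocks := by
  by_cases hz : blocks.length = 0
  · simp only [longest_distance, longest_distance_alt, PySem.List.len_eq, hz]
    rw [show ((0:Nat):Int) = 0 by norm_num, PySem.List.pyRange_one_eq_nil le_rfl]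
    simp
  · rw [a_char blocks (by omega), b_char blocks (by omega)]
    exact max_eq blocks (by omega)

-- ===== VERDICT (by name: the statement is the Claim_ definition above) =====
theorem longest_distance_spec : Claim_equal_longest_distance := by
  intro blocks _
  show longest_distance blocks = longest_distance_alt blocks
  exact ab_eq blocks
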